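-- pv_equiv track=rewrite | github.com/JanWalczak/Custom-Language-written-in-python | Main/LLVMActions.py | compute_output_shape
-- ===== SOURCE A (Python) =====
-- def compute_output_shape(index_combinations):
--     if not index_combinations:
--         return ()
--
--     num_dims = len(index_combinations[0])
--     shape = []
--
--     for dim in range(num_dims):
--         # Collect unique indices for this dimension
--         unique_values = {combo[dim] for combo in index_combinations}
--         # Only include this dimension if it was actually sliced (more than one unique index)
--         if len(unique_values) != 1:
--             shape.append(len(unique_values))
--     # if only one index is in range
--     if not shape:
--         shape = [len(index_combinations)]
--     return shape
-- ===== SOURCE B (Python) =====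
-- def compute_output_shape(index_combinations):
--     if not index_combinations:
--         return ()
--     shape = []
--     for col in zip(*index_combinations):
--         s = sorted(col)
--         distinct = 1 + sum(1 for a, b in zip(s, s[1:]) if a != b)
--         if distinct != 1:
--             shape.append(distinct)
--     if not shape:
--         shape = [len(index_combinations)]
--     return shape
-- ===== Notes on version B (the rewrite author's own statement) =====
-- stated objective: alternative
-- what changed: B transposes the combinations with zip(*...) and counts each column's distinct values by sorting it and counting adjacent unequal pairs (sort-then-scan), instead of A's per-dimension set comprehensions that hash-deduplicate re-scans of all combinations.
import Mathlib
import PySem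

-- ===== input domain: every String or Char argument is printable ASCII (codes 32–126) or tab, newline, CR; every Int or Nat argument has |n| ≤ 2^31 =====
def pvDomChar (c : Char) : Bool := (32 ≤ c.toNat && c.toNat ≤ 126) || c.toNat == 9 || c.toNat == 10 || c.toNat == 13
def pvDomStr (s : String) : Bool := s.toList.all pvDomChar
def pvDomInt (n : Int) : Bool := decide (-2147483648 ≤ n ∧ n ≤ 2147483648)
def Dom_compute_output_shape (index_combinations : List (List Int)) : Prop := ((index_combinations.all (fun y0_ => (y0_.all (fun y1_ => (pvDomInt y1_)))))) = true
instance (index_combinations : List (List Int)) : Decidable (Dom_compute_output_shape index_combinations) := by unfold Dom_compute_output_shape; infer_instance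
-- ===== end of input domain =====

-- B transposes with zip(*) and counts each column's distinct values by sorting and counting
-- adjacent unequal pairs, instead of A's per-dimension set comprehensions (alternative algorithm).

-- ===== PORT A =====
def compute_output_shape (index_combinations : List (List Int)) : List Int :=
  if index_combinations.isEmpty then [] else
  let num_dims : Int := (index_combinations.headD []).length
  let shape : List Int :=
    (PySem.List.pyRange 0 num_dims 1).foldl (fun shape dim =>
      let unique_values : PySem.Set Int :=
        PySem.Set.ofList (index_combinations.map (fun combo => PySem.List.pyGetD combo dim 0))
      if PySem.Set.len unique_values ≠ 1 then shape ++ [PySem.Set.len unique_values]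
      else shape) []
  if shape.isEmpty then [(index_combinations.length : Int)] else shape

-- ===== PORT B =====
def compute_output_shape_alt (index_combinations : List (List Int)) : List Int :=
  if index_combinations.isEmpty then [] else
  -- zip(*index_combinations): the j-th column for every j below the minimal row length
  let m : Nat := index_combinations.foldl (fun acc c => min acc c.length) (index_combinations.headD []).length
  let cols : List (List Int) := (List.range m).map (fun j => index_combinations.map (fun c => c.getD j 0))
  let shape : List Int :=
    cols.foldl (fun shape col =>
      let s := PySem.List.sorted col (fun x => x) false
      let distinct : Int := 1 + ((s.zip s.tail).countP (fun p => p.1 != p.2) : Int)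
      if distinct ≠ 1 then shape ++ [distinct] else shape) []
  if shape.isEmpty then [(index_combinations.length : Int)] else shape

-- ===== PRECONDITION & SPEC =====
-- Pre_ excludes ragged inputs where some combination is shorter than the first one: A raises IndexError there.
def Pre_compute_output_shape (index_combinations : List (List Int)) : Prop :=
  ∀ combo ∈ index_combinations, (index_combinations.headD []).length ≤ combo.length
instance (index_combinations : List (List Int)) : Decidable (Pre_compute_output_shape index_combinations) := by unfold Pre_compute_output_shape; infer_instance
def pvWitness_compute_output_shape : List (List Int) := [[0, 5], [0, 7], [1, 5]]

def Spec_compute_output_shape (index_combinations : List (List Int)) (out : List Int) : Prop := out = compute_output_shape_alt index_combinations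
instance (index_combinations : List (List Int)) (out : List Int) : Decidable (Spec_compute_output_shape index_combinations out) := by unfold Spec_compute_output_shape; infer_instance

-- ===== CLAIM (what is proved, stated in full; the proofs are below) =====
def Claim_equal_compute_output_shape : Prop := ∀ (index_combinations : List (List Int)), Dom_compute_output_shape index_combinations → Pre_compute_output_shape index_combinations → Spec_compute_output_shape index_combinations (compute_output_shape index_combinations)

-- ===== LEMMAS AND PROOFS =====

-- Folding min over lengths that are all ≥ the start leaves the start unchanged.
lemma foldl_min_eq (l : List (List Int)) (n : Nat) (h : ∀ c ∈ l, n ≤ c.length) :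
    l.foldl (fun acc c => min acc c.length) n = n := by
  induction l with
  | nil => rfl
  | cons c cs ih =>
    simp only [List.foldl_cons, Nat.min_eq_left (h c (by simp))]
    exact ih (fun c' hc' => h c' (by simp [hc']))

-- In a nondecreasing nonempty list, 1 + number of adjacent unequal pairs = number of distinct values.
lemma runs_count (s : List Int) (hs : s.Pairwise (· ≤ ·)) (hne : s ≠ []) :
    1 + (s.zip s.tail).countP (fun p => p.1 != p.2) = s.toFinset.card := by
  induction s with
  | nil => exact absurd rfl hne
  | cons a t ih =>
    cases t with
    | nil => simp
    | cons b t2 =>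
      have hs' : (b :: t2).Pairwise (· ≤ ·) := hs.tail
      have hab : a ≤ b := (List.pairwise_cons.mp hs).1 b (by simp)
      have ihv := ih hs' (by simp)
      simp only [List.tail_cons, List.zip_cons_cons, List.countP_cons] at ihv ⊢
      by_cases hEq : a = b
      · rw [if_neg (by simp [hEq]), Nat.add_zero, ihv]
        simp [List.toFinset_cons, hEq]
      · have hlt : a < b := lt_of_le_of_ne hab hEq
        have hnot : a ∉ (b :: t2).toFinset := by
          simp only [List.toFinset_cons, Finset.mem_insert, List.mem_toFinset]
          rintro (rfl | hmem)
          · exact hEq rfl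
          · exact absurd ((List.pairwise_cons.mp hs').1 a hmem) (not_le.mpr hlt)
        rw [if_pos (by simp [hEq]), List.toFinset_cons, Finset.card_insert_of_notMem hnot]
        omega

-- The sort-and-scan distinct count equals Python's len(set(...)).
lemma distinct_eq_setlen (l : List Int) (hl : l ≠ []) :
    (1 + (((PySem.List.sorted l (fun x => x) false).zip
            (PySem.List.sorted l (fun x => x) false).tail).countP (fun p => p.1 != p.2) : Int))
      = PySem.Set.len (PySem.Set.ofList l) := by
  set s := PySem.List.sorted l (fun x => x) false with hsdef
  have hperm : s.Perm l := PySem.List.sorted_perm l _ _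
  have hpair : s.Pairwise (· ≤ ·) := by
    have := PySem.List.sorted_pairwise l (fun x => x) (κ := Int)
    simpa using this
  have hne : s ≠ [] := by
    intro h0
    have hp := hperm.symm
    rw [h0] at hp
    exact hl hp.eq_nil
  have hruns := runs_count s hpair hne
  have hfin : s.toFinset = l.toFinset := by
    ext x
    simp [List.mem_toFinset, hperm.mem_iff]
  have hset : (PySem.Set.ofList l).length = l.toFinset.card := by
    rw [← List.toFinset_card_of_nodup (PySem.Set.nodup_ofList l)]
    congr 1
    ext x
    simp [PySem.Set.mem_ofList]
  unfold PySem.Set.len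
  rw [hset, ← hfin, ← hruns]
  push_cast
  ring

-- ===== VERDICT (by name: the statement is the Claim_ definition above) =====
theorem compute_output_shape_spec : Claim_equal_compute_output_shape := by
  intro ics _ hpre
  unfold Spec_compute_output_shape compute_output_shape compute_output_shape_alt
  cases ics with
  | nil => rfl
  | cons c0 rest =>
    simp only [List.isEmpty_cons, Bool.false_eq_true, if_false]
    set ics := c0 :: rest with hics
    set n := (ics.headD []).length with hn
    have hm : ics.foldl (fun acc c => min acc c.length) n = n :=
      foldl_min_eq ics n (fun c hc => hpre c hc)
    rw [hm]
    have key :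
        (PySem.List.pyRange 0 (n : Int) 1).foldl (fun shape dim =>
            let unique_values : PySem.Set Int :=
              PySem.Set.ofList (ics.map (fun combo => PySem.List.pyGetD combo dim 0))
            if PySem.Set.len unique_values ≠ 1 then shape ++ [PySem.Set.len unique_values]
            else shape) []
          = ((List.range n).map (fun j => ics.map (fun c => c.getD j 0))).foldl
              (fun shape col =>
                let s := PySem.List.sorted col (fun x => x) false
                let distinct : Int := 1 + ((s.zip s.tail).countP (fun p => p.1 != p.2) : Int)
                if distinct ≠ 1 then shape ++ [distinct] else shape) [] := by
      rw [PySem.List.pyRange_zero_nat n, List.foldl_map, List.foldl_map]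
      apply PySem.List.foldl_congr_mem
      intro acc j _
      have hmap : ics.map (fun combo => PySem.List.pyGetD combo ((j : Nat) : Int) 0)
          = ics.map (fun c => c.getD j 0) :=
        List.map_congr_left (fun c _ => PySem.List.pyGetD_natCast c j 0)
      have hcol : ics.map (fun c => c.getD j 0) ≠ [] := by simp [hics]
      simp only [hmap, ← distinct_eq_setlen _ hcol]
    rw [key]
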